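-- pv_equiv track=rewrite | github.com/lucas-j-zheng/football-analytics-backend | app/services/langchain_service.py | _analyze_situations
-- ===== SOURCE A (Python) =====
-- from typing import List, Dict, Any, Optional, Tuple
--
-- def _analyze_situations(plays_data: List[Dict]) -> str:
--     """Analyze situational football data"""
--     downs = {}
--     distances = {"Short (1-3)": 0, "Medium (4-7)": 0, "Long (8+)": 0}
--     field_position = {"Red Zone (1-20)": 0, "Mid Field (21-80)": 0, "Own End (81-100)": 0}
--
--     for play in plays_data:
--         # Down analysis
--         down = play.get('down', 0)
--         if down:
--             downs[f"Down {down}"] = downs.get(f"Down {down}", 0) + 1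
--
--         # Distance analysis
--         distance = play.get('distance', 0)
--         if 1 <= distance <= 3:
--             distances["Short (1-3)"] += 1
--         elif 4 <= distance <= 7:
--             distances["Medium (4-7)"] += 1
--         elif distance >= 8:
--             distances["Long (8+)"] += 1
--
--         # Field position analysis
--         yard_line = play.get('yard_line', 50)
--         if 1 <= yard_line <= 20:
--             field_position["Red Zone (1-20)"] += 1
--         elif 21 <= yard_line <= 80:
--             field_position["Mid Field (21-80)"] += 1
--         else:
--             field_position["Own End (81-100)"] += 1
--
--     result = "DOWNS:\n"
--     result += "\n".join([f"- {down}: {count} plays" for down, count in sorted(downs.items())])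
--     result += "\n\nDISTANCES:\n"
--     result += "\n".join([f"- {dist}: {count} plays" for dist, count in distances.items()])
--     result += "\n\nFIELD POSITION:\n"
--     result += "\n".join([f"- {pos}: {count} plays" for pos, count in field_position.items()])
--
--     return result
-- ===== SOURCE B (Python) =====
-- def _analyze_situations(plays_data):
--     """Analyze situational football data (per-bucket passes instead of one fused loop)."""
--     labels = [f"Down {p.get('down', 0)}" for p in plays_data if p.get('down', 0)]
--     down_lines = [f"- {k}: {labels.count(k)} plays" for k in sorted(set(labels))]
--
--     short = len([p for p in plays_data if 1 <= p.get('distance', 0) <= 3])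
--     medium = len([p for p in plays_data if 4 <= p.get('distance', 0) <= 7])
--     long_ = len([p for p in plays_data if p.get('distance', 0) >= 8])
--
--     red = len([p for p in plays_data if 1 <= p.get('yard_line', 50) <= 20])
--     mid = len([p for p in plays_data if 21 <= p.get('yard_line', 50) <= 80])
--     own = len(plays_data) - red - mid
--
--     return ("DOWNS:\n" + "\n".join(down_lines)
--             + "\n\nDISTANCES:\n"
--             + "\n".join([f"- Short (1-3): {short} plays",
--                          f"- Medium (4-7): {medium} plays",
--                          f"- Long (8+): {long_} plays"])
--             + "\n\nFIELD POSITION:\n"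
--             + "\n".join([f"- Red Zone (1-20): {red} plays",
--                          f"- Mid Field (21-80): {mid} plays",
--                          f"- Own End (81-100): {own} plays"]))
-- ===== Notes on version B (the rewrite author's own statement) =====
-- stated objective: simpler
-- what changed: Replaces the fused loop over three mutable dicts by independent per-bucket passes: downs come from sorted(set(labels)) with list.count instead of a dict accumulator, each distance/field bucket is a filtered count, and the Own-End bucket is computed as len - red - mid; the output is formatted directly without dicts.
import Mathlib
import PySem

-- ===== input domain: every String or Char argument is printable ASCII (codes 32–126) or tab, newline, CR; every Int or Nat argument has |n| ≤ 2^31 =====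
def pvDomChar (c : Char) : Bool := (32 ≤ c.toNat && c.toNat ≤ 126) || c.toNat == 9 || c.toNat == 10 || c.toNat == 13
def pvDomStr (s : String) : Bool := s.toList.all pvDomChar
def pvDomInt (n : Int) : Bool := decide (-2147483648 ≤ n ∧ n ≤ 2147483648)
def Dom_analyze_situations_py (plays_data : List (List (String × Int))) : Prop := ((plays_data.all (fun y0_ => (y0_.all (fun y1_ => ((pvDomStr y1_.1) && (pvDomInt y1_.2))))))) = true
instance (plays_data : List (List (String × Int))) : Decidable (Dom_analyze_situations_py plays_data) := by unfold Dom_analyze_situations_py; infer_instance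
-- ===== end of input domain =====

-- B recomputes each aggregate in its own pass (sorted(set)+count for downs, one filtered
-- count per distance/field bucket, Own End as len - red - mid) instead of A's fused loop
-- over three mutable dicts; objective: simpler, not faster.

-- shared format helpers (the same f-string / .get appear in both Pythons)
def pvGet (play : List (String × Int)) (key : String) (dflt : Int) : Int :=
  (PySem.Dict.mk play).getD key dflt

def pvLine (k : String) (c : Int) : String :=
  "- " ++ k ++ ": " ++ PySem.Int.toStr c ++ " plays"

-- ===== PORT A =====
-- the three commented blocks of A's loop body
def pvStepDowns (downs : PySem.Dict String Int) (play : List (String × Int)) : PySem.Dict String Int :=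
  let down := pvGet play "down" 0
  if down != 0 then
    downs.insert ("Down " ++ PySem.Int.toStr down) (downs.getD ("Down " ++ PySem.Int.toStr down) 0 + 1)
  else downs

def pvStepDist (distances : PySem.Dict String Int) (play : List (String × Int)) : PySem.Dict String Int :=
  let distance := pvGet play "distance" 0
  if 1 ≤ distance ∧ distance ≤ 3 then distances.modify "Short (1-3)" 0 (· + 1)
  else if 4 ≤ distance ∧ distance ≤ 7 then distances.modify "Medium (4-7)" 0 (· + 1)
  else if 8 ≤ distance then distances.modify "Long (8+)" 0 (· + 1)
  else distances

def pvStepField (field : PySem.Dict String Int) (play : List (String × Int)) : PySem.Dict String Int :=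
  let yard := pvGet play "yard_line" 50
  if 1 ≤ yard ∧ yard ≤ 20 then field.modify "Red Zone (1-20)" 0 (· + 1)
  else if 21 ≤ yard ∧ yard ≤ 80 then field.modify "Mid Field (21-80)" 0 (· + 1)
  else field.modify "Own End (81-100)" 0 (· + 1)

def analyze_situations_py (plays_data : List (List (String × Int))) : String :=
  let st := plays_data.foldl
    (fun (st : PySem.Dict String Int × PySem.Dict String Int × PySem.Dict String Int) play =>
      (pvStepDowns st.1 play, pvStepDist st.2.1 play, pvStepField st.2.2 play))
    (PySem.Dict.empty,
     PySem.Dict.mk [("Short (1-3)", 0), ("Medium (4-7)", 0), ("Long (8+)", 0)],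
     PySem.Dict.mk [("Red Zone (1-20)", 0), ("Mid Field (21-80)", 0), ("Own End (81-100)", 0)])
  -- the dict keys are distinct, so Python's tuple sort of sorted(downs.items()) is sorted2
  "DOWNS:\n"
    ++ PySem.Str.join "\n" ((PySem.List.sorted2 st.1.items (fun p => p.1) (fun p => p.2)).map (fun p => pvLine p.1 p.2))
    ++ "\n\nDISTANCES:\n"
    ++ PySem.Str.join "\n" (st.2.1.items.map (fun p => pvLine p.1 p.2))
    ++ "\n\nFIELD POSITION:\n"
    ++ PySem.Str.join "\n" (st.2.2.items.map (fun p => pvLine p.1 p.2))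

-- ===== PORT B =====
def analyze_situations_py_alt (plays_data : List (List (String × Int))) : String :=
  let labels := (plays_data.filter (fun p => pvGet p "down" 0 != 0)).map
      (fun p => "Down " ++ PySem.Int.toStr (pvGet p "down" 0))
  let downLines := (PySem.List.sorted (PySem.Set.ofList labels) (fun x => x)).map
      (fun k => pvLine k (labels.count k))
  let short := ((plays_data.filter (fun p => decide (1 ≤ pvGet p "distance" 0 ∧ pvGet p "distance" 0 ≤ 3))).length : Int)
  let medium := ((plays_data.filter (fun p => decide (4 ≤ pvGet p "distance" 0 ∧ pvGet p "distance" 0 ≤ 7))).length : Int)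
  let long := ((plays_data.filter (fun p => decide (8 ≤ pvGet p "distance" 0))).length : Int)
  let red := ((plays_data.filter (fun p => decide (1 ≤ pvGet p "yard_line" 50 ∧ pvGet p "yard_line" 50 ≤ 20))).length : Int)
  let mid := ((plays_data.filter (fun p => decide (21 ≤ pvGet p "yard_line" 50 ∧ pvGet p "yard_line" 50 ≤ 80))).length : Int)
  let own := (plays_data.length : Int) - red - mid
  "DOWNS:\n" ++ PySem.Str.join "\n" downLines
    ++ "\n\nDISTANCES:\n"
    ++ PySem.Str.join "\n" [pvLine "Short (1-3)" short, pvLine "Medium (4-7)" medium, pvLine "Long (8+)" long]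
    ++ "\n\nFIELD POSITION:\n"
    ++ PySem.Str.join "\n" [pvLine "Red Zone (1-20)" red, pvLine "Mid Field (21-80)" mid, pvLine "Own End (81-100)" own]

-- ===== PRECONDITION & SPEC =====
def Spec_analyze_situations_py (plays_data : List (List (String × Int))) (out : String) : Prop := out = analyze_situations_py_alt plays_data
instance (plays_data : List (List (String × Int))) (out : String) : Decidable (Spec_analyze_situations_py plays_data out) := by unfold Spec_analyze_situations_py; infer_instance

-- ===== CLAIM (what is proved, stated in full; the proofs are below) =====
def Claim_equal_analyze_situations_py : Prop := ∀ (plays_data : List (List (String × Int))), Dom_analyze_situations_py plays_data → Spec_analyze_situations_py plays_data (analyze_situations_py plays_data)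

-- ===== LEMMAS AND PROOFS =====

-- inserting with two compare functions that agree on the elements involved
theorem pv_insertBy_congr {α : Type} (f g : α → α → Bool) (x : α) (ys : List α)
    (h : ∀ y ∈ ys, f x y = g x y) :
    PySem.List.insertBy f x ys = PySem.List.insertBy g x ys := by
  induction ys with
  | nil => rfl
  | cons y ys ih =>
    simp only [PySem.List.insertBy, h y (by simp)]
    split <;> simp_all

theorem pv_foldl_insertBy_congr {α : Type} (f g : α → α → Bool) (S : List α) :
    ∀ (xs acc : List α), (∀ a ∈ acc, a ∈ S) → (∀ a ∈ xs, a ∈ S) →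
    (∀ a ∈ S, ∀ b ∈ S, f a b = g a b) →
    xs.foldl (fun acc x => PySem.List.insertBy f x acc) acc
      = xs.foldl (fun acc x => PySem.List.insertBy g x acc) acc := by
  intro xs
  induction xs with
  | nil => intro acc _ _ _; rfl
  | cons x xs ih =>
    intro acc hacc hxs h
    have hx : x ∈ S := hxs x (by simp)
    simp only [List.foldl_cons]
    rw [pv_insertBy_congr f g x acc (fun y hy => h x hx y (hacc y hy))]
    exact ih _ (fun a ha => ((PySem.List.mem_insertBy g x a acc).1 ha).elim
        (fun e => e ▸ hx) (fun hm => hacc a hm))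
      (fun a ha => hxs a (by simp [ha])) h

-- on a list whose first components are distinct, Python's tuple sort is the sort by first component
theorem pv_sorted2_fst {xs : List (String × Int)} (h : (xs.map Prod.fst).Nodup) :
    PySem.List.sorted2 xs (fun p => p.1) (fun p => p.2)
      = PySem.List.sorted xs (fun p => p.1) := by
  unfold PySem.List.sorted2 PySem.List.sorted
  simp only [if_neg (by decide : ¬ (false = true))]
  apply pv_foldl_insertBy_congr _ _ xs xs [] (by simp) (fun a ha => ha)
  intro a ha b hb
  by_cases hlt : a.1 < b.1
  · simp [hlt]
  · by_cases hgt : b.1 < a.1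
    · simp [hlt, hgt]
    · have : a = b := List.inj_on_of_nodup_map h ha hb (le_antisymm (not_lt.1 hgt) (not_lt.1 hlt))
      subst this
      simp

def pvLabels (plays_data : List (List (String × Int))) : List String :=
  (plays_data.filter (fun p => pvGet p "down" 0 != 0)).map
    (fun p => "Down " ++ PySem.Int.toStr (pvGet p "down" 0))

theorem pv_downs_eq (plays_data : List (List (String × Int))) :
    plays_data.foldl pvStepDowns PySem.Dict.empty = PySem.Dict.counter (pvLabels plays_data) := by
  unfold pvStepDowns pvLabels
  rw [PySem.List.foldl_if_eq_foldl_filter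
        (p := fun play => pvGet play "down" 0 != 0)
        (f := fun (d : PySem.Dict String Int) play =>
          d.insert ("Down " ++ PySem.Int.toStr (pvGet play "down" 0))
            (d.getD ("Down " ++ PySem.Int.toStr (pvGet play "down" 0)) 0 + 1)),
      ← List.foldl_map (f := fun p => "Down " ++ PySem.Int.toStr (pvGet p "down" 0))
        (g := fun (d : PySem.Dict String Int) x => d.insert x (d.getD x 0 + 1)),
      PySem.Dict.foldl_insert_getD_add_one_eq_counter]

theorem pv_modS (a b c : Int) : (PySem.Dict.mk [("Short (1-3)", a), ("Medium (4-7)", b), ("Long (8+)", c)]).modify "Short (1-3)" 0 (· + 1) = PySem.Dict.mk [("Short (1-3)", a + 1), ("Medium (4-7)", b), ("Long (8+)", c)] := rfl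
theorem pv_modM (a b c : Int) : (PySem.Dict.mk [("Short (1-3)", a), ("Medium (4-7)", b), ("Long (8+)", c)]).modify "Medium (4-7)" 0 (· + 1) = PySem.Dict.mk [("Short (1-3)", a), ("Medium (4-7)", b + 1), ("Long (8+)", c)] := rfl
theorem pv_modL (a b c : Int) : (PySem.Dict.mk [("Short (1-3)", a), ("Medium (4-7)", b), ("Long (8+)", c)]).modify "Long (8+)" 0 (· + 1) = PySem.Dict.mk [("Short (1-3)", a), ("Medium (4-7)", b), ("Long (8+)", c + 1)] := rfl
theorem pv_modR (a b c : Int) : (PySem.Dict.mk [("Red Zone (1-20)", a), ("Mid Field (21-80)", b), ("Own End (81-100)", c)]).modify "Red Zone (1-20)" 0 (· + 1) = PySem.Dict.mk [("Red Zone (1-20)", a + 1), ("Mid Field (21-80)", b), ("Own End (81-100)", c)] := rfl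
theorem pv_modMid (a b c : Int) : (PySem.Dict.mk [("Red Zone (1-20)", a), ("Mid Field (21-80)", b), ("Own End (81-100)", c)]).modify "Mid Field (21-80)" 0 (· + 1) = PySem.Dict.mk [("Red Zone (1-20)", a), ("Mid Field (21-80)", b + 1), ("Own End (81-100)", c)] := rfl
theorem pv_modO (a b c : Int) : (PySem.Dict.mk [("Red Zone (1-20)", a), ("Mid Field (21-80)", b), ("Own End (81-100)", c)]).modify "Own End (81-100)" 0 (· + 1) = PySem.Dict.mk [("Red Zone (1-20)", a), ("Mid Field (21-80)", b), ("Own End (81-100)", c + 1)] := rfl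

theorem pv_dist_inv (plays_data : List (List (String × Int))) (a b c : Int) :
    plays_data.foldl pvStepDist (PySem.Dict.mk [("Short (1-3)", a), ("Medium (4-7)", b), ("Long (8+)", c)])
      = PySem.Dict.mk
        [("Short (1-3)", a + ((plays_data.filter (fun p => decide (1 ≤ pvGet p "distance" 0 ∧ pvGet p "distance" 0 ≤ 3))).length : Int)),
         ("Medium (4-7)", b + ((plays_data.filter (fun p => decide (4 ≤ pvGet p "distance" 0 ∧ pvGet p "distance" 0 ≤ 7))).length : Int)),
         ("Long (8+)", c + ((plays_data.filter (fun p => decide (8 ≤ pvGet p "distance" 0))).length : Int))] := by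
  induction plays_data generalizing a b c with
  | nil => simp
  | cons p l ih =>
    simp only [List.foldl_cons, pvStepDist]
    by_cases h1 : 1 ≤ pvGet p "distance" 0 ∧ pvGet p "distance" 0 ≤ 3
    · have c2 : ¬(4 ≤ pvGet p "distance" 0 ∧ pvGet p "distance" 0 ≤ 7) := by omega
      have c3 : ¬(8 ≤ pvGet p "distance" 0) := by omega
      rw [if_pos h1, pv_modS, ih]
      simp [h1, c2, c3]
      omega
    · rw [if_neg h1]
      by_cases h2 : 4 ≤ pvGet p "distance" 0 ∧ pvGet p "distance" 0 ≤ 7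
      · have c3 : ¬(8 ≤ pvGet p "distance" 0) := by omega
        rw [if_pos h2, pv_modM, ih]
        simp [h1, h2, c3]
        omega
      · rw [if_neg h2]
        by_cases h3 : 8 ≤ pvGet p "distance" 0
        · rw [if_pos h3, pv_modL, ih]
          simp [h1, h2, h3]
          omega
        · rw [if_neg h3, ih]
          simp [h1, h2, h3]

theorem pv_field_inv (plays_data : List (List (String × Int))) (a b c : Int) :
    plays_data.foldl pvStepField (PySem.Dict.mk [("Red Zone (1-20)", a), ("Mid Field (21-80)", b), ("Own End (81-100)", c)])
      = PySem.Dict.mk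
        [("Red Zone (1-20)", a + ((plays_data.filter (fun p => decide (1 ≤ pvGet p "yard_line" 50 ∧ pvGet p "yard_line" 50 ≤ 20))).length : Int)),
         ("Mid Field (21-80)", b + ((plays_data.filter (fun p => decide (21 ≤ pvGet p "yard_line" 50 ∧ pvGet p "yard_line" 50 ≤ 80))).length : Int)),
         ("Own End (81-100)", c + ((plays_data.length : Int)
            - ((plays_data.filter (fun p => decide (1 ≤ pvGet p "yard_line" 50 ∧ pvGet p "yard_line" 50 ≤ 20))).length : Int)
            - ((plays_data.filter (fun p => decide (21 ≤ pvGet p "yard_line" 50 ∧ pvGet p "yard_line" 50 ≤ 80))).length : Int)))] := by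
  induction plays_data generalizing a b c with
  | nil => simp
  | cons p l ih =>
    simp only [List.foldl_cons, pvStepField]
    by_cases h1 : 1 ≤ pvGet p "yard_line" 50 ∧ pvGet p "yard_line" 50 ≤ 20
    · have c2 : ¬(21 ≤ pvGet p "yard_line" 50 ∧ pvGet p "yard_line" 50 ≤ 80) := by omega
      rw [if_pos h1, pv_modR, ih]
      simp [h1, c2]
      omega
    · rw [if_neg h1]
      by_cases h2 : 21 ≤ pvGet p "yard_line" 50 ∧ pvGet p "yard_line" 50 ≤ 80
      · rw [if_pos h2, pv_modMid, ih]
        simp [h1, h2]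
        omega
      · rw [if_neg h2, pv_modO, ih]
        simp [h1, h2]
        omega

theorem pv_downs_lines (plays_data : List (List (String × Int))) :
    (PySem.List.sorted2 (plays_data.foldl pvStepDowns PySem.Dict.empty).items (fun p => p.1) (fun p => p.2)).map (fun p => pvLine p.1 p.2)
      = (PySem.List.sorted (PySem.Set.ofList (pvLabels plays_data)) (fun x => x)).map
          (fun k => pvLine k ((pvLabels plays_data).count k)) := by
  rw [pv_downs_eq, PySem.Dict.items_counter]
  have hnodup : (((PySem.Set.ofList (pvLabels plays_data)).map
      (fun k => (k, ((pvLabels plays_data).count k : Int)))).map Prod.fst).Nodup := by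
    simp only [List.map_map]
    have h : (Prod.fst ∘ fun k => (k, ((pvLabels plays_data).count k : Int))) = id := rfl
    rw [h, List.map_id]
    exact PySem.Set.nodup_ofList (pvLabels plays_data)
  rw [pv_sorted2_fst hnodup]
  rw [PySem.List.sorted_eq_of_perm_of_pairwise_lt _
        ((PySem.List.sorted (PySem.Set.ofList (pvLabels plays_data)) (fun x => x)).map
          (fun k => (k, ((pvLabels plays_data).count k : Int)))) _
        ((PySem.List.sorted_perm _ _ _).map _)
        (by
          rw [List.pairwise_map]
          exact PySem.List.sorted_ofList_pairwise_lt (pvLabels plays_data))]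
  simp [List.map_map, Function.comp]

-- ===== VERDICT (by name: the statement is the Claim_ definition above) =====
theorem analyze_situations_py_spec : Claim_equal_analyze_situations_py := by
  intro plays_data _
  unfold Spec_analyze_situations_py
  unfold analyze_situations_py analyze_situations_py_alt
  dsimp only
  rw [PySem.List.foldl_prod_mk (f := pvStepDowns)
        (g := fun (s : PySem.Dict String Int × PySem.Dict String Int) e => (pvStepDist s.1 e, pvStepField s.2 e)),
      PySem.List.foldl_prod_mk (f := pvStepDist) (g := pvStepField)]
  rw [pv_dist_inv, pv_field_inv]
  rw [pv_downs_lines]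
  simp [pvLabels]
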